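-- pv_equiv track=rewrite | github.com/mutjin08/toybox-algorithm | 프로그래머스-도서실습/12장 PCCP/72138_유전법칙.py | find
-- ===== SOURCE A (Python) =====
-- def find(n, p):
--     n -= 1
--     p -= 1
--
--     stack = []
--     while n>0:
--         stack.append(p%4)
--         n-=1
--         p//=4
--     while stack:
--         x = stack.pop()
--         if x==0:
--             return "RR"
--         elif x==3:
--             return "rr"
--     return "Rr"
-- ===== SOURCE B (Python) =====
-- def find(n, p):
--     # Scan the n-1 base-4 digits of p-1 from most significant down;
--     # the first digit that is 0 means "RR", the first 3 means "rr".
--     p -= 1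
--     for k in range(n - 2, -1, -1):
--         d = (p // 4 ** k) % 4
--         if d == 0:
--             return "RR"
--         if d == 3:
--             return "rr"
--     return "Rr"
-- ===== Notes on version B (the rewrite author's own statement) =====
-- stated objective: simpler
-- what changed: Instead of pushing all n-1 low-order base-4 digits of p-1 onto a stack and then popping them, B reads the digits most-significant-first in a single loop by arithmetic indexing (p-1)//4**k % 4, eliminating the stack; A always extracts all n-1 digits before answering, while B's early return typically stops after the top digit.
import Mathlib
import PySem

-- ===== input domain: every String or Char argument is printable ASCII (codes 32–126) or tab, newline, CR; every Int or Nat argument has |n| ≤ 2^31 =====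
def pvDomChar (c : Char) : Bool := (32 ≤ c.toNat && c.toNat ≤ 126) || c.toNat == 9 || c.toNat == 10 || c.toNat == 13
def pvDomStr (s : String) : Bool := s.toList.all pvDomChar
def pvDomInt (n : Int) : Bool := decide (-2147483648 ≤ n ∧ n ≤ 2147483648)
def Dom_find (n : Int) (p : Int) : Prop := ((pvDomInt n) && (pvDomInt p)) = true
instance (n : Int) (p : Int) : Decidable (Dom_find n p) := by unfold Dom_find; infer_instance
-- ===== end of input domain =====

-- B replaces A's stack of all n-1 low base-4 digits (built then popped) by a single
-- most-significant-first loop reading digits arithmetically as (p-1)//4**k % 4.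


-- ===== PORT A =====
-- first while loop: while n>0: stack.append(p%4); n-=1; p//=4   (fuel = n.toNat; the loop
-- decrements n by 1; append-accumulation transcribed as cons + final reverse, same stack)
def findA1 : Nat → Int → List Int → List Int
  | 0, _, acc => acc.reverse
  | m + 1, p, acc => findA1 m (PySem.Int.floordiv p 4) (PySem.Int.mod p 4 :: acc)

-- second while loop: pop from the end of the stack = scan the reversed stack front-to-back
def scanRR : List Int → String
  | [] => "Rr"
  | x :: rest => if x = 0 then "RR" else if x = 3 then "rr" else scanRR rest

def find (n : Int) (p : Int) : String :=
  let n' := n - 1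
  let p' := p - 1
  let stack := findA1 n'.toNat p' []
  scanRR stack.reverse

-- ===== PORT B =====
-- for k in range(n-2, -1, -1): d = (p // 4**k) % 4; … with early returns; after the loop "Rr"
def scanB (q : Int) (k : Nat) : String :=
  if PySem.Int.mod (PySem.Int.floordiv q (4 ^ k)) 4 = 0 then "RR"
  else if PySem.Int.mod (PySem.Int.floordiv q (4 ^ k)) 4 = 3 then "rr"
  else match k with
    | 0 => "Rr"
    | k' + 1 => scanB q k'

def find_alt (n : Int) (p : Int) : String :=
  let q := p - 1
  if n - 2 < 0 then "Rr" else scanB q (n - 2).toNat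

-- ===== PRECONDITION & SPEC =====
def Spec_find (n : Int) (p : Int) (out : String) : Prop := out = find_alt n p
instance (n : Int) (p : Int) (out : String) : Decidable (Spec_find n p out) := by unfold Spec_find; infer_instance

-- ===== CLAIM =====
def Claim_equal_find : Prop := ∀ (n : Int) (p : Int), Dom_find n p → Spec_find n p (find n p)

-- ===== LEMMAS AND PROOFS =====

-- the i-th base-4 digit of q, Python semantics
def dig (q : Int) (i : Nat) : Int := PySem.Int.mod (PySem.Int.floordiv q (4 ^ i)) 4

-- the list of the m low digits of q, low-to-high
def Dg : Nat → Int → List Int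
  | 0, _ => []
  | m + 1, q => PySem.Int.mod q 4 :: Dg m (PySem.Int.floordiv q 4)

theorem findA1_eq (m : Nat) : ∀ (q : Int) (acc : List Int), findA1 m q acc = acc.reverse ++ Dg m q := by
  induction m with
  | zero => intro q acc; simp [findA1, Dg]
  | succ m ih => intro q acc; simp [findA1, Dg, ih]

theorem floordiv_floordiv (q : Int) (i : Nat) :
    PySem.Int.floordiv (PySem.Int.floordiv q 4) (4 ^ i) = PySem.Int.floordiv q (4 ^ (i + 1)) := by
  rw [PySem.Int.floordiv_eq_ediv_of_pos (by norm_num), PySem.Int.floordiv_eq_ediv_of_pos (by positivity),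
      PySem.Int.floordiv_eq_ediv_of_pos (by positivity), Int.ediv_ediv_of_nonneg (by norm_num),
      pow_succ']

theorem Dg_eq_map (m : Nat) : ∀ q : Int, Dg m q = (List.range m).map (dig q) := by
  induction m with
  | zero => intro q; simp [Dg]
  | succ m ih =>
      intro q
      rw [List.range_succ_eq_map]
      simp only [Dg, ih, List.map_cons, List.map_map]
      congr 1
      · unfold dig
        rw [pow_zero, PySem.Int.floordiv_eq_ediv_of_pos (by norm_num), Int.ediv_one]
      · apply List.map_congr_left
        intro i _
        show dig (PySem.Int.floordiv q 4) i = dig q (i + 1)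
        unfold dig
        rw [floordiv_floordiv]

theorem scanRR_rev (q : Int) (m : Nat) :
    scanRR (((List.range (m + 1)).map (dig q)).reverse) = scanB q m := by
  induction m with
  | zero =>
      rw [show List.range 1 = [0] from rfl]
      simp only [List.map_cons, List.map_nil, List.reverse_cons, List.reverse_nil,
        List.nil_append, scanRR, scanB.eq_def, dig]
  | succ m ih =>
      rw [List.range_succ, List.map_append, List.reverse_append]
      simp only [List.map_cons, List.map_nil, List.reverse_cons, List.reverse_nil,
        List.nil_append, List.cons_append]
      rw [scanRR, ih]
      conv_rhs => rw [scanB.eq_def]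
      simp only [dig]
      rfl

-- ===== VERDICT =====
theorem find_spec : Claim_equal_find := by
  intro n p _
  show find n p = find_alt n p
  simp only [find, find_alt]
  by_cases hk : n - 2 < 0
  · have h0 : (n - 1).toNat = 0 := by omega
    simp [hk, h0, findA1, scanRR]
  · have hm : (n - 1).toNat = (n - 2).toNat + 1 := by omega
    rw [findA1_eq, Dg_eq_map, hm, List.reverse_nil, List.nil_append, scanRR_rev, if_neg hk]
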